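-- pv_equiv track=rewrite | github.com/MooreGuy/bioutils | python/dnaSequence.py | findMotifs
-- ===== SOURCE A (Python) =====
-- def kmers(dnaSequence, k):
--     kmers = []
--     for i in range(len(dnaSequence)-k+1):
--         kmers.append(dnaSequence[i:i+k])
--     return kmers
--
-- def neighbors(dnaSequence, d):
--     if d == 0:
--         return [dnaSequence]
--
--     if (len(dnaSequence) == 1):
--         return ["A", "C", "G", "T"]
--
--     neighborhood = []
--
--     suffix = dnaSequence[1:]
--     suffixNeighbors = neighbors(suffix, d)
--     for suffixNeighbor in suffixNeighbors:
--         # If the hamming distance allows a mismatch, add all possible mismatches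
--         if (distance(suffix, suffixNeighbor) < d):
--             for nucleotide in ["A", "C", "G", "T"]:
--                 newSequence = nucleotide + suffixNeighbor
--                 neighborhood.append(newSequence)
--         else:
--             firstNucleotide = dnaSequence[0]
--             newSequence = firstNucleotide + suffixNeighbor
--             neighborhood.append(newSequence)
--
--     return neighborhood
--
-- def distance(sequenceA, sequenceB):
--     mismatches = 0
--     if len(sequenceA) > len(sequenceB):
--         longerSequence = sequenceA
--         shorterSequence = sequenceB
--     else:
--         longerSequence = sequenceB
--         shorterSequence = sequenceA
--     for i in range(len(shorterSequence)):
--         if longerSequence[i] != shorterSequence[i]: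
--             mismatches += 1
--     mismatches += len(longerSequence) - len(shorterSequence)
--     return mismatches
--
-- def findMotifs(sequences, k, d):
--     motifs = []
--     mers = []
--     for sequence in sequences:
--         mers.extend(kmers(sequence, k))
--     for mer in mers:
--         for neighbor in neighbors(mer, d):
--             if isMotif(sequences, neighbor, d):
--                 motifs.append(neighbor)
--
--     return set(motifs)
--
-- def isMotif(sequences, pattern, d):
--     for sequence in sequences:
--         if contains(sequence, pattern, d) == False:
--             return False
--
--     return True
--
-- def contains(sequence, pattern, d):
--     for i in range(0, (len(sequence) - len(pattern)) + 1):
--         if distance(sequence[i:i+len(pattern)], pattern) <= d: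
--             return True
--     return False
-- ===== SOURCE B (Python) =====
-- def findMotifs(sequences, k, d):
--     ACGT = "ACGT"
--
--     def neighborhood(s):
--         # iterative right-to-left construction, tracking the mismatch count
--         if d == 0:
--             return [s]
--         acc = [("", 0)]
--         for c in reversed(s):
--             nxt = []
--             for u, r in acc:
--                 if r < d:
--                     for x in ACGT:
--                         nxt.append((x + u, r + (x != c)))
--                 else:
--                     nxt.append((c + u, r))
--             acc = nxt
--         return [u for u, _ in acc]
--
--     cands = []
--     for seq in sequences:
--         for i in range(len(seq) - k + 1):
--             cands.extend(neighborhood(seq[i:i + k]))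
--
--     def occurs(seq, p):
--         m = len(p)
--         return any(sum(x != y for x, y in zip(seq[i:i + m], p)) <= d
--                    for i in range(len(seq) - m + 1))
--
--     return {p for p in cands if all(occurs(seq, p) for seq in sequences)}
-- ===== Notes on version B (the rewrite author's own statement) =====
-- stated objective: alternative
-- what changed: B builds each k-mer's neighborhood iteratively right-to-left while tracking the running mismatch count (instead of A's recursion that recomputes distance() at every level), and tests candidates with a zip-based mismatch count inline, replacing A's kmers/neighbors/distance/isMotif/contains helper cascade.
import Mathlib
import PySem

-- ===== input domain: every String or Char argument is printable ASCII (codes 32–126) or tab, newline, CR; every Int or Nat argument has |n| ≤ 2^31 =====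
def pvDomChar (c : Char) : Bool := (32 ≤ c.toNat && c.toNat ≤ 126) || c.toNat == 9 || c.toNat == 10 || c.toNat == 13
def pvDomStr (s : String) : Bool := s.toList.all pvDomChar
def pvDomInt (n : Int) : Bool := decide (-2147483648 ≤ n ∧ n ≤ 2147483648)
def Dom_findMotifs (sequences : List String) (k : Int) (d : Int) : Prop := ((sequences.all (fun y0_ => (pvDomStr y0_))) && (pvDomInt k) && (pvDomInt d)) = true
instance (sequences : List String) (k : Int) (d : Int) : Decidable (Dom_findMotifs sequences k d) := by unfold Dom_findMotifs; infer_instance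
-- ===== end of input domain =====

-- B replaces A's recursive neighbor generation (which re-runs distance() at every level)
-- and its contains/isMotif helper cascade by an iterative right-to-left neighborhood
-- construction tracking the running mismatch count, and a zip-based occurrence test
-- (objective: alternative); return value only, no mutation.

-- ===== PORT A =====
def pvACGT : List Char := ['A', 'C', 'G', 'T']

-- distance(sequenceA, sequenceB)
def distA (a b : List Char) : Int :=
  let p := if a.length > b.length then (a, b) else (b, a)
  let mism : Int := (PySem.List.pyRange 0 (p.2.length : Int) 1).foldl
      (fun acc i => if PySem.List.pyGetD p.1 i ' ' ≠ PySem.List.pyGetD p.2 i ' ' then acc + 1 else acc) 0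
  mism + ((p.1.length : Int) - (p.2.length : Int))

-- neighbors(dnaSequence, d); on the empty string with d ≠ 0 the Python recurses forever
-- (excluded by Pre_, so the [] branch below is never reached on admitted inputs)
def neighborsA (s : List Char) (d : Int) : List (List Char) :=
  if d = 0 then [s]
  else if s.length = 1 then [['A'], ['C'], ['G'], ['T']]
  else
    match s with
    | [] => []
    | c :: t =>
      (neighborsA t d).foldl
        (fun acc u =>
          if distA t u < d then acc ++ pvACGT.map (fun x => x :: u)
          else acc ++ [c :: u]) []

-- kmers(dnaSequence, k)
def kmersA (s : List Char) (k : Int) : List (List Char) :=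
  (PySem.List.pyRange 0 ((s.length : Int) - k + 1) 1).map
    (fun i => PySem.List.slice s (some i) (some (i + k)))

-- contains(sequence, pattern, d)
def containsA (seq pat : List Char) (d : Int) : Bool :=
  (PySem.List.pyRange 0 ((seq.length : Int) - (pat.length : Int) + 1) 1).any
    (fun i => distA (PySem.List.slice seq (some i) (some (i + (pat.length : Int)))) pat ≤ d)

-- isMotif(sequences, pattern, d)
def isMotifA (seqs : List (List Char)) (pat : List Char) (d : Int) : Bool :=
  seqs.all (fun s => containsA s pat d)

def findMotifs (sequences : List String) (k : Int) (d : Int) : List String :=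
  (PySem.Set.ofList
    (((sequences.map (·.toList)).foldl (fun acc s => acc ++ kmersA s k) []).foldl
      (fun acc mer =>
        (neighborsA mer d).foldl
          (fun a n => if isMotifA (sequences.map (·.toList)) n d then a ++ [n] else a) acc)
      [])).map (fun cs => String.ofList cs)

-- ===== PORT B =====
-- sum(x != y for x, y in zip(w, p))
def hamB (a b : List Char) : Int :=
  ((a.zip b).map (fun q => if q.1 ≠ q.2 then (1 : Int) else 0)).sum

-- inner loop of one step of the right-to-left neighborhood construction
def stepB (d : Int) (acc : List (List Char × Int)) (c : Char) : List (List Char × Int) :=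
  acc.foldl (fun nxt ur =>
    if ur.2 < d then
      nxt ++ pvACGT.map (fun x => (x :: ur.1, ur.2 + if x ≠ c then 1 else 0))
    else nxt ++ [(c :: ur.1, ur.2)]) []

-- neighborhood(s)
def neighborhoodB (s : List Char) (d : Int) : List (List Char) :=
  if d = 0 then [s]
  else (s.reverse.foldl (stepB d) [([], 0)]).map Prod.fst

-- occurs(seq, p)
def occursB (seq p : List Char) (d : Int) : Bool :=
  (PySem.List.pyRange 0 ((seq.length : Int) - (p.length : Int) + 1) 1).any
    (fun i => hamB (PySem.List.slice seq (some i) (some (i + (p.length : Int)))) p ≤ d)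

def findMotifs_alt (sequences : List String) (k : Int) (d : Int) : List String :=
  (PySem.Set.ofList
    (((sequences.map (·.toList)).foldl (fun acc s =>
        (PySem.List.pyRange 0 ((s.length : Int) - k + 1) 1).foldl
          (fun a i => a ++ neighborhoodB (PySem.List.slice s (some i) (some (i + k))) d) acc) []).filter
      (fun q => (sequences.map (·.toList)).all (fun s => occursB s q d)))).map
    (fun cs => String.ofList cs)

-- ===== PRECONDITION & SPEC =====
-- Pre_ excludes exactly the inputs on which A raises (RecursionError): with d ≠ 0 and
-- k ≤ 0 every nonempty sequence list produces an empty k-mer, on which neighbors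
-- recurses forever; A returns normally on every other input.
def Pre_findMotifs (sequences : List String) (k : Int) (d : Int) : Prop :=
  d ≠ 0 → 1 ≤ k ∨ sequences = []
instance (sequences : List String) (k : Int) (d : Int) : Decidable (Pre_findMotifs sequences k d) := by unfold Pre_findMotifs; infer_instance
def pvWitness_findMotifs : List String × Int × Int := (["ACGTT", "CGTAA"], 3, 1)

def Spec_findMotifs (sequences : List String) (k : Int) (d : Int) (out : List String) : Prop := out = findMotifs_alt sequences k d
instance (sequences : List String) (k : Int) (d : Int) (out : List String) : Decidable (Spec_findMotifs sequences k d out) := by unfold Spec_findMotifs; infer_instance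

-- ===== CLAIM (what is proved, stated in full; the proofs are below) =====
def Claim_equal_findMotifs : Prop := ∀ (sequences : List String) (k : Int) (d : Int), Dom_findMotifs sequences k d → Pre_findMotifs sequences k d → Spec_findMotifs sequences k d (findMotifs sequences k d)

-- ===== LEMMAS AND PROOFS =====

theorem hamB_cons (a b : Char) (as bs : List Char) :
    hamB (a :: as) (b :: bs) = (if a ≠ b then 1 else 0) + hamB as bs := by
  simp [hamB, List.zip_cons_cons]

theorem hamB_nonneg (a b : List Char) : 0 ≤ hamB a b := by
  unfold hamB
  apply List.sum_nonneg
  intro x hx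
  simp only [List.mem_map] at hx
  obtain ⟨q, -, rfl⟩ := hx
  split <;> omega

-- distance = zip-mismatch-count on equal-length lists
theorem distA_eq_hamB (a b : List Char) (h : a.length = b.length) :
    distA a b = hamB a b := by
  have hp : (if a.length > b.length then (a, b) else (b, a)) = (b, a) := by
    rw [if_neg]; omega
  rw [distA]
  simp only [hp]
  have hzl : (b.zip a).length = a.length := by rw [List.length_zip]; omega
  have hcong : ∀ (acc : Int), ∀ i ∈ PySem.List.pyRange 0 ((b.zip a).length : Int) 1,
      (if PySem.List.pyGetD b i ' ' ≠ PySem.List.pyGetD a i ' ' then acc + 1 else acc)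
      = (if (PySem.List.pyGetD (b.zip a) i (' ', ' ')).1 ≠ (PySem.List.pyGetD (b.zip a) i (' ', ' ')).2 then acc + 1 else acc) := by
    intro acc i hi
    rw [PySem.List.mem_pyRange_one] at hi
    rw [PySem.List.pyGetD_eq_getElem _ _ hi.1 (by rw [hzl] at hi; omega : i < ((b.zip a).length : Int)),
        PySem.List.pyGetD_eq_getElem _ _ hi.1 (by rw [hzl] at hi; omega : i < (b.length : Int)),
        PySem.List.pyGetD_eq_getElem _ _ hi.1 (by rw [hzl] at hi; omega : i < (a.length : Int))]
    simp [List.getElem_zip]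
  have e1 : PySem.List.pyRange 0 ((a.length : Int)) 1 = PySem.List.pyRange 0 ((b.zip a).length : Int) 1 := by
    rw [hzl]
  rw [e1, PySem.List.foldl_congr_mem _ _ _ _ hcong]
  have e2 := PySem.List.foldl_pyRange_zero_pyGetD (b.zip a) (' ', ' ')
      (fun (acc : Int) q => if q.1 ≠ q.2 then acc + 1 else acc) (0 : Int)
  simp only [PySem.List.len] at e2
  rw [e2]
  have e4 := PySem.List.foldl_count_if (fun (q : Char × Char) => decide (q.1 ≠ q.2)) (b.zip a) (0 : Int)
  simp only [decide_eq_true_eq] at e4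
  rw [e4]
  unfold hamB
  have e5 := PySem.List.sum_map_ite_one_zero (fun (q : Char × Char) => decide (q.1 ≠ q.2)) (a.zip b)
  simp only [decide_eq_true_eq] at e5
  rw [e5]
  rw [← List.zip_swap a b, List.countP_map]
  have e3 : List.countP ((fun q => decide (q.1 ≠ q.2)) ∘ Prod.swap) (a.zip b)
      = List.countP (fun (q : Char × Char) => decide (q.1 ≠ q.2)) (a.zip b) := by
    apply List.countP_congr
    intro x hx
    simp [ne_comm]
  rw [e3]
  omega

-- the fold shape of neighbors on a cons of length ≥ 2
theorem neighborsA_cons {d : Int} (c : Char) (t : List Char) (hd : d ≠ 0) (ht : t ≠ []) :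
    neighborsA (c :: t) d =
      (neighborsA t d).flatMap
        (fun u => if distA t u < d then pvACGT.map (fun x => x :: u) else [c :: u]) := by
  have hlen : (c :: t).length ≠ 1 := by
    simp [List.length_cons]
    intro h0; exact ht h0
  rw [neighborsA, if_neg hd, if_neg hlen]
  have hb : (fun (acc : List (List Char)) u =>
      if distA t u < d then acc ++ pvACGT.map (fun x => x :: u) else acc ++ [c :: u])
      = (fun acc u => acc ++ (if distA t u < d then pvACGT.map (fun x => x :: u) else [c :: u])) := by
    funext acc u; split <;> rfl
  rw [hb, PySem.List.foldl_append_eq_flatMap]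
  rfl

theorem stepB_flat (d : Int) (acc : List (List Char × Int)) (c : Char) :
    stepB d acc c = acc.flatMap (fun ur =>
      if ur.2 < d then pvACGT.map (fun x => (x :: ur.1, ur.2 + if x ≠ c then 1 else 0))
      else [(c :: ur.1, ur.2)]) := by
  rw [stepB]
  have hb : (fun (nxt : List (List Char × Int)) (ur : List Char × Int) =>
      if ur.2 < d then nxt ++ pvACGT.map (fun x => (x :: ur.1, ur.2 + if x ≠ c then 1 else 0))
      else nxt ++ [(c :: ur.1, ur.2)])
      = (fun nxt ur => nxt ++ (if ur.2 < d then pvACGT.map (fun x => (x :: ur.1, ur.2 + if x ≠ c then 1 else 0)) else [(c :: ur.1, ur.2)])) := by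
    funext nxt ur; split <;> rfl
  rw [hb, PySem.List.foldl_append_eq_flatMap]
  rfl

-- every element of neighbors(s, d) has the length of s
theorem length_of_mem_neighborsA (s : List Char) (d : Int) (u : List Char)
    (hu : u ∈ neighborsA s d) : u.length = s.length := by
  induction s generalizing u with
  | nil =>
    rw [neighborsA] at hu
    by_cases hd : d = 0
    · simp [hd] at hu; simp [hu]
    · simp [hd] at hu
  | cons c t ih =>
    by_cases hd : d = 0
    · rw [neighborsA, if_pos hd] at hu; simp at hu; simp [hu]
    · by_cases ht : t = []
      · subst ht
        rw [neighborsA, if_neg hd, if_pos (by simp)] at hu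
        fin_cases hu <;> rfl
      · rw [neighborsA_cons c t hd ht] at hu
        simp only [List.mem_flatMap] at hu
        obtain ⟨v, hv, hu⟩ := hu
        have := ih v hv
        split at hu
        · simp only [List.mem_map] at hu
          obtain ⟨x, -, rfl⟩ := hu
          simp [this]
        · simp at hu
          simp [hu, this]

-- the iterative construction computes neighbors together with their distances
theorem foldr_stepB (s : List Char) (d : Int) (hs : s ≠ []) (hd : 1 ≤ d) :
    s.foldr (fun c acc => stepB d acc c) [([], 0)] =
      (neighborsA s d).map (fun u => (u, hamB s u)) := by
  induction s with
  | nil => exact absurd rfl hs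
  | cons c t ih =>
    by_cases ht : t = []
    · subst ht
      rw [List.foldr_cons, List.foldr_nil, stepB_flat]
      rw [neighborsA, if_neg (by omega), if_pos (by simp)]
      simp only [List.flatMap_cons, List.flatMap_nil, List.append_nil]
      rw [if_pos (by omega : (0:Int) < d)]
      simp [pvACGT, hamB, ne_comm]
    · rw [List.foldr_cons, ih ht, stepB_flat]
      rw [neighborsA_cons c t (by omega) ht]
      rw [List.flatMap_map, List.map_flatMap]
      apply List.flatMap_congr
      intro u hu
      have hlen : u.length = t.length := length_of_mem_neighborsA t d u hu
      have hdist : distA t u = hamB t u := distA_eq_hamB t u hlen.symm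
      simp only [hdist]
      split
      · rw [List.map_map]
        apply List.map_congr_left
        intro x hx
        simp only [Function.comp]
        rw [hamB_cons]
        congr 1
        by_cases hxc : x = c
        · simp [hxc]
        · simp only [if_pos hxc, if_pos (Ne.symm hxc)]
          omega
      · simp [hamB_cons]

theorem neighborhoodB_eq_neighborsA (s : List Char) (d : Int) (h : d = 0 ∨ (1 ≤ d ∧ s ≠ [])) :
    neighborhoodB s d = neighborsA s d := by
  rcases h with h | ⟨hd, hs⟩
  · subst h
    rw [neighborhoodB, neighborsA.eq_def]
    rfl
  · rw [neighborhoodB, if_neg (by omega)]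
    rw [List.foldl_reverse, foldr_stepB s d hs hd, List.map_map]
    have hid : (Prod.fst ∘ fun u : List Char => (u, hamB s u)) = id := rfl
    rw [hid, List.map_id]

-- window slices in contains/occurs have the pattern's length
theorem length_slice_window (seq : List Char) (m : Nat) (i : Int)
    (h0 : 0 ≤ i) (h1 : i < (seq.length : Int) - (m : Int) + 1) :
    (PySem.List.slice seq (some i) (some (i + (m : Int)))).length = m := by
  rw [PySem.List.slice_toNat seq h0 (by omega)]
  simp only [List.length_take, List.length_drop]
  omega

theorem containsA_eq_occursB (seq p : List Char) (d : Int) :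
    containsA seq p d = occursB seq p d := by
  unfold containsA occursB
  rw [Bool.eq_iff_iff]
  simp only [List.any_eq_true, PySem.List.mem_pyRange_one]
  constructor
  · rintro ⟨i, hi, hle⟩
    refine ⟨i, hi, ?_⟩
    rwa [← distA_eq_hamB _ _ (length_slice_window seq p.length i hi.1 hi.2)]
  · rintro ⟨i, hi, hle⟩
    refine ⟨i, hi, ?_⟩
    rwa [distA_eq_hamB _ _ (length_slice_window seq p.length i hi.1 hi.2)]

theorem containsA_false_of_neg (seq p : List Char) (d : Int) (hd : d < 0) :
    containsA seq p d = false := by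
  rw [containsA_eq_occursB]
  unfold occursB
  rw [List.any_eq_false]
  intro i hi
  rw [PySem.List.mem_pyRange_one] at hi
  have := hamB_nonneg (PySem.List.slice seq (some i) (some (i + (p.length : Int)))) p
  simp only [decide_eq_true_eq]
  omega

theorem occursB_false_of_neg (seq p : List Char) (d : Int) (hd : d < 0) :
    occursB seq p d = false := by
  rw [← containsA_eq_occursB]
  exact containsA_false_of_neg seq p d hd

-- the union of all candidate neighborhoods, A's and B's generation order
def allNA (sequences : List String) (k d : Int) : List (List Char) :=
  (sequences.map (·.toList)).flatMap (fun s => (kmersA s k).flatMap (fun m => neighborsA m d))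

def allNB (sequences : List String) (k d : Int) : List (List Char) :=
  (sequences.map (·.toList)).flatMap (fun s =>
    (PySem.List.pyRange 0 ((s.length : Int) - k + 1) 1).flatMap
      (fun i => neighborhoodB (PySem.List.slice s (some i) (some (i + k))) d))

theorem findMotifs_shape (sequences : List String) (k d : Int) :
    findMotifs sequences k d =
      (PySem.List.dedup ((allNA sequences k d).filter
        (fun n => isMotifA (sequences.map (·.toList)) n d))).map (fun cs => String.ofList cs) := by
  unfold findMotifs allNA
  rw [PySem.List.foldl_append_eq_flatMap, List.nil_append]
  have h1 : ∀ (acc : List (List Char)) (mer : List Char),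
      (neighborsA mer d).foldl
        (fun a n => if isMotifA (sequences.map (·.toList)) n d then a ++ [n] else a) acc
      = acc ++ (neighborsA mer d).filter (fun n => isMotifA (sequences.map (·.toList)) n d) := by
    intro acc mer
    simpa using PySem.List.foldl_append_if (fun n => isMotifA (sequences.map (·.toList)) n d)
      id (neighborsA mer d) acc
  simp only [h1]
  rw [PySem.List.foldl_append_eq_flatMap, List.nil_append, ← List.filter_flatMap,
      ← PySem.List.dedup_eq_ofList, List.flatMap_assoc]

theorem findMotifs_alt_shape (sequences : List String) (k d : Int) :
    findMotifs_alt sequences k d =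
      (PySem.Set.ofList ((allNB sequences k d).filter
        (fun q => (sequences.map (·.toList)).all (fun s => occursB s q d)))).map
        (fun cs => String.ofList cs) := by
  unfold findMotifs_alt allNB
  have h1 : ∀ (acc : List (List Char)) (s : List Char),
      (PySem.List.pyRange 0 ((s.length : Int) - k + 1) 1).foldl
        (fun a i => a ++ neighborhoodB (PySem.List.slice s (some i) (some (i + k))) d) acc
      = acc ++ (PySem.List.pyRange 0 ((s.length : Int) - k + 1) 1).flatMap
          (fun i => neighborhoodB (PySem.List.slice s (some i) (some (i + k))) d) := by
    intro acc s
    exact PySem.List.foldl_append_eq_flatMap _ _ _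
  simp only [h1]
  rw [PySem.List.foldl_append_eq_flatMap, List.nil_append]

theorem allNB_eq_allNA (sequences : List String) (k d : Int)
    (h : d = 0 ∨ (1 ≤ d ∧ 1 ≤ k)) :
    allNB sequences k d = allNA sequences k d := by
  unfold allNA allNB
  apply List.flatMap_congr
  intro s hs
  rw [kmersA, List.flatMap_map]
  apply List.flatMap_congr
  intro i hi
  rw [PySem.List.mem_pyRange_one] at hi
  apply neighborhoodB_eq_neighborsA
  rcases h with h | ⟨hd, hk⟩
  · exact Or.inl h
  · refine Or.inr ⟨hd, ?_⟩
    have hl : (PySem.List.slice s (some i) (some (i + k))).length = k.toNat := by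
      have := length_slice_window s k.toNat i hi.1 (by omega)
      rwa [Int.toNat_of_nonneg (by omega)] at this
    intro hnil
    rw [hnil] at hl
    simp at hl
    omega

-- A's motif test equals B's, as filter predicates
theorem pred_eq (seqs : List (List Char)) (d : Int) :
    (fun n => isMotifA seqs n d) = (fun q => seqs.all (fun s => occursB s q d)) := by
  funext n
  unfold isMotifA
  congr 1
  funext s
  exact containsA_eq_occursB s n d

-- ===== VERDICT (by name: the statement is the Claim_ definition above) =====
theorem findMotifs_spec : Claim_equal_findMotifs := by
  unfold Claim_equal_findMotifs
  intro sequences k d _ hpre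
  unfold Spec_findMotifs
  rw [findMotifs_shape, findMotifs_alt_shape, pred_eq]
  by_cases hnil : sequences = []
  · subst hnil
    rfl
  by_cases hd0 : d = 0
  · rw [allNB_eq_allNA sequences k d (Or.inl hd0), PySem.List.dedup_eq_ofList]
  rcases hpre hd0 with hk | h
  · by_cases hdpos : 1 ≤ d
    · rw [allNB_eq_allNA sequences k d (Or.inr ⟨hdpos, hk⟩), PySem.List.dedup_eq_ofList]
    · -- d < 0: both filters are empty
      have hdneg : d < 0 := by omega
      have hA : (allNA sequences k d).filter
          (fun q => (sequences.map (·.toList)).all (fun s => occursB s q d)) = [] := by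
        rw [List.filter_eq_nil_iff]
        intro n hn
        simp only [Bool.not_eq_true]
        rw [List.all_eq_false]
        obtain ⟨s0, hs0⟩ : ∃ s0, s0 ∈ sequences.map (·.toList) := by
          cases sequences with
          | nil => exact absurd rfl hnil
          | cons a l => exact ⟨a.toList, by simp⟩
        exact ⟨s0, hs0, by rw [occursB_false_of_neg s0 n d hdneg]; simp⟩
      have hB : (allNB sequences k d).filter
          (fun q => (sequences.map (·.toList)).all (fun s => occursB s q d)) = [] := by
        rw [List.filter_eq_nil_iff]
        intro n hn
        simp only [Bool.not_eq_true]
        rw [List.all_eq_false]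
        obtain ⟨s0, hs0⟩ : ∃ s0, s0 ∈ sequences.map (·.toList) := by
          cases sequences with
          | nil => exact absurd rfl hnil
          | cons a l => exact ⟨a.toList, by simp⟩
        exact ⟨s0, hs0, by rw [occursB_false_of_neg s0 n d hdneg]; simp⟩
      rw [hA, hB]
      rfl
  · exact absurd h hnil
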